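-- pv_equiv track=rewrite | github.com/toki866/ApexTraderAI | tools/check_leak_alignment.py | _detect_close_col
-- ===== SOURCE A (Python) =====
-- from typing import List, Optional, Tuple, Dict
--
-- def _detect_close_col(cols: List[str]) -> Optional[str]:
--     # Prefer Close_eff if exists, then Close
--     for key in ("close_eff", "closeeff", "p_eff", "peff"):
--         for c in cols:
--             if c.lower() == key:
--                 return c
--     for c in cols:
--         if c.lower() == "close":
--             return c
--     for c in cols:
--         if "close" in c.lower():
--             return c
--     return None
-- ===== SOURCE B (Python) =====
-- from typing import List, Optional
--
--
-- def _rank(lc: str) -> int: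
--     if lc == "close_eff":
--         return 0
--     if lc == "closeeff":
--         return 1
--     if lc == "p_eff":
--         return 2
--     if lc == "peff":
--         return 3
--     if lc == "close":
--         return 4
--     if "close" in lc:
--         return 5
--     return 6
--
--
-- def _detect_close_col(cols: List[str]) -> Optional[str]:
--     # One pass: keep the first column with the strictly smallest priority rank.
--     best = None
--     best_rank = 6
--     for c in cols:
--         r = _rank(c.lower())
--         if r < best_rank:
--             best, best_rank = c, r
--     return best
-- ===== Notes on version B (the rewrite author's own statement) =====
-- stated objective: faster
-- what changed: Replaces A's six sequential scans of cols (one per priority level) by a single pass that assigns each column a priority rank and keeps the first column with the strictly smallest rank.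
import Mathlib
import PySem

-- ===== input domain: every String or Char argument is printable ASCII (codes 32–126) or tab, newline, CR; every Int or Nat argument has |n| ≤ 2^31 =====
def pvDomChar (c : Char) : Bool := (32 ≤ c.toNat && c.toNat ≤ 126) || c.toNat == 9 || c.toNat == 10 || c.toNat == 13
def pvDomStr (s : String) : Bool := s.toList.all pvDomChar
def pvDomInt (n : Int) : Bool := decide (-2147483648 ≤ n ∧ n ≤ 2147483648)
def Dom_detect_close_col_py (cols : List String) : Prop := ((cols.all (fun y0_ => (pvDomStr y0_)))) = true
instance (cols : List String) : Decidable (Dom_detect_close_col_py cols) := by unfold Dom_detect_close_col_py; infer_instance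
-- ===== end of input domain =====

-- B replaces A's six sequential scans of cols by a single ranked pass keeping the first
-- column with the strictly smallest priority rank (same return value, one traversal).


-- ===== PORT A =====
-- for key in (...): for c in cols: if c.lower() == key: return c   — findSome? over the key
-- tuple of an inner find? over cols; then the "close" scan; then the substring scan.
def detect_close_col_py (cols : List String) : Option String :=
  match (["close_eff", "closeeff", "p_eff", "peff"] : List String).findSome?
      (fun key => cols.find? (fun c => PySem.Str.lower c == key)) with
  | some c => some c
  | none =>
    match cols.find? (fun c => PySem.Str.lower c == "close") with
    | some c => some c
    | none => cols.find? (fun c => PySem.Str.isIn "close" (PySem.Str.lower c))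

-- ===== PORT B =====
-- _rank from Source B: the early-return chain becomes an if-chain.
def pvRank (lc : String) : Nat :=
  if lc == "close_eff" then 0
  else if lc == "closeeff" then 1
  else if lc == "p_eff" then 2
  else if lc == "peff" then 3
  else if lc == "close" then 4
  else if PySem.Str.isIn "close" lc then 5
  else 6

-- single pass: state (best, best_rank), update on a strictly smaller rank
def detect_close_col_py_alt (cols : List String) : Option String :=
  (cols.foldl
    (fun (acc : Option String × Nat) c =>
      let r := pvRank (PySem.Str.lower c)
      if r < acc.2 then (some c, r) else acc)
    (none, 6)).1

-- ===== PRECONDITION & SPEC =====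
def Spec_detect_close_col_py (cols : List String) (out : Option String) : Prop := out = detect_close_col_py_alt cols
instance (cols : List String) (out : Option String) : Decidable (Spec_detect_close_col_py cols out) := by unfold Spec_detect_close_col_py; infer_instance

-- ===== CLAIM (what is proved, stated in full; the proofs are below) =====
def Claim_equal_detect_close_col_py : Prop := ∀ (cols : List String), Dom_detect_close_col_py cols → Spec_detect_close_col_py cols (detect_close_col_py cols)

-- ===== LEMMAS AND PROOFS =====

-- minimal rank occurring in cols (6 = none)
def pvMrk (cols : List String) : Nat :=
  cols.foldr (fun c m => min (pvRank (PySem.Str.lower c)) m) 6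

theorem pvMrk_cons (d : String) (ds : List String) :
    pvMrk (d :: ds) = min (pvRank (PySem.Str.lower d)) (pvMrk ds) := rfl

theorem pvMrk_le_rank (cols : List String) :
    ∀ c ∈ cols, pvMrk cols ≤ pvRank (PySem.Str.lower c) := by
  induction cols with
  | nil => simp
  | cons d ds ih =>
    intro c hc
    rw [pvMrk_cons]
    rcases List.mem_cons.mp hc with rfl | hc
    · omega
    · have := ih c hc; omega

theorem pvMrk_le_six (cols : List String) : pvMrk cols ≤ 6 := by
  induction cols with
  | nil => simp [pvMrk]
  | cons d ds ih => rw [pvMrk_cons]; omega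

theorem pvMrk_attained (cols : List String) (h : pvMrk cols < 6) :
    ∃ c ∈ cols, pvRank (PySem.Str.lower c) = pvMrk cols := by
  induction cols with
  | nil => simp [pvMrk] at h
  | cons d ds ih =>
    rw [pvMrk_cons] at h ⊢
    by_cases hd : pvRank (PySem.Str.lower d) ≤ pvMrk ds
    · exact ⟨d, List.mem_cons_self, by omega⟩
    · obtain ⟨c, hc, hrc⟩ := ih (by omega)
      exact ⟨c, List.mem_cons_of_mem _ hc, by omega⟩

-- the B loop computes the first column attaining the minimal rank
theorem alt_loop (cols : List String) :
    ∀ (b : Option String) (r : Nat), r ≤ 6 →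
      (cols.foldl
        (fun (acc : Option String × Nat) c =>
          let rc := pvRank (PySem.Str.lower c)
          if rc < acc.2 then (some c, rc) else acc)
        (b, r)).1
      = if pvMrk cols < r then
          cols.find? (fun c => pvRank (PySem.Str.lower c) == pvMrk cols)
        else b := by
  induction cols with
  | nil =>
    intro b r hr
    rw [List.foldl_nil, if_neg (by simp [pvMrk]; omega)]
  | cons d ds ih =>
    intro b r hr
    simp only [List.foldl_cons]
    by_cases hd : pvRank (PySem.Str.lower d) < r
    · rw [if_pos hd, ih (some d) _ (by omega)]
      by_cases h2 : pvMrk ds < pvRank (PySem.Str.lower d)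
      · rw [if_pos h2]
        have hmm : pvMrk (d :: ds) = pvMrk ds := by rw [pvMrk_cons]; omega
        rw [hmm, if_pos (by omega), List.find?_cons_of_neg (by simp; omega)]
      · rw [if_neg h2]
        have hmm : pvMrk (d :: ds) = pvRank (PySem.Str.lower d) := by rw [pvMrk_cons]; omega
        rw [hmm, if_pos hd, List.find?_cons_of_pos (by simp)]
    · rw [if_neg hd, ih b r hr]
      by_cases h2 : pvMrk ds < r
      · rw [if_pos h2]
        have hmm : pvMrk (d :: ds) = pvMrk ds := by rw [pvMrk_cons]; omega
        rw [hmm, if_pos h2, List.find?_cons_of_neg (by simp; omega)]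
      · rw [if_neg h2]
        have : ¬ pvMrk (d :: ds) < r := by rw [pvMrk_cons]; omega
        rw [if_neg this]

theorem alt_eq (cols : List String) :
    detect_close_col_py_alt cols
      = if pvMrk cols < 6 then
          cols.find? (fun c => pvRank (PySem.Str.lower c) == pvMrk cols)
        else none := by
  simpa using alt_loop cols none 6 (by omega)

-- predicate bridges: A's per-pass tests expressed through pvRank
theorem rank0 (s : String) : (s == "close_eff") = (pvRank s == 0) := by
  unfold pvRank; split_ifs <;> simp_all
theorem rank1 (s : String) : (s == "closeeff") = (pvRank s == 1) := by
  unfold pvRank; split_ifs <;> simp_all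
theorem rank2 (s : String) : (s == "p_eff") = (pvRank s == 2) := by
  unfold pvRank; split_ifs <;> simp_all
theorem rank3 (s : String) : (s == "peff") = (pvRank s == 3) := by
  unfold pvRank; split_ifs <;> simp_all
theorem rank4 (s : String) : (s == "close") = (pvRank s == 4) := by
  unfold pvRank; split_ifs <;> simp_all
theorem rank5 (s : String) (h : 5 ≤ pvRank s) :
    PySem.Str.isIn "close" s = (pvRank s == 5) := by
  unfold pvRank at *
  split_ifs at * <;> simp_all

theorem find_rank_none (cols : List String) (i : Nat) (h : i < pvMrk cols) :
    cols.find? (fun c => pvRank (PySem.Str.lower c) == i) = none := by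
  rw [List.find?_eq_none]
  intro c hc
  have := pvMrk_le_rank cols c hc
  simp; omega

theorem find_rank_some (cols : List String) (h : pvMrk cols < 6) :
    ∃ c, cols.find? (fun c => pvRank (PySem.Str.lower c) == pvMrk cols) = some c := by
  obtain ⟨c, hc, hrc⟩ := pvMrk_attained cols h
  have : cols.find? (fun c => pvRank (PySem.Str.lower c) == pvMrk cols) ≠ none := by
    intro hn
    rw [List.find?_eq_none] at hn
    exact hn c hc (by simp [hrc])
  exact Option.ne_none_iff_exists'.mp this

theorem find_isIn_eq (cols : List String) (h : ∀ c ∈ cols, 5 ≤ pvRank (PySem.Str.lower c)) :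
    cols.find? (fun c => PySem.Str.isIn "close" (PySem.Str.lower c))
      = cols.find? (fun c => pvRank (PySem.Str.lower c) == 5) := by
  induction cols with
  | nil => rfl
  | cons d ds ih =>
    have hd := h d List.mem_cons_self
    simp only [List.find?, rank5 _ hd]
    split
    · rfl
    · exact ih (fun c hc => h c (List.mem_cons_of_mem _ hc))

-- ===== VERDICT (by name: the statement is the Claim_ definition above) =====
theorem detect_close_col_py_spec : Claim_equal_detect_close_col_py := by
  intro cols _
  unfold Spec_detect_close_col_py
  rw [alt_eq]
  unfold detect_close_col_py
  have h0 : cols.find? (fun c => PySem.Str.lower c == "close_eff")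
      = cols.find? (fun c => pvRank (PySem.Str.lower c) == 0) := by simp only [rank0]
  have h1 : cols.find? (fun c => PySem.Str.lower c == "closeeff")
      = cols.find? (fun c => pvRank (PySem.Str.lower c) == 1) := by simp only [rank1]
  have h2 : cols.find? (fun c => PySem.Str.lower c == "p_eff")
      = cols.find? (fun c => pvRank (PySem.Str.lower c) == 2) := by simp only [rank2]
  have h3 : cols.find? (fun c => PySem.Str.lower c == "peff")
      = cols.find? (fun c => pvRank (PySem.Str.lower c) == 3) := by simp only [rank3]
  have h4 : cols.find? (fun c => PySem.Str.lower c == "close")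
      = cols.find? (fun c => pvRank (PySem.Str.lower c) == 4) := by simp only [rank4]
  simp only [List.findSome?_cons, List.findSome?_nil, h0, h1, h2, h3, h4]
  have h6 := pvMrk_le_six cols
  rcases hm : pvMrk cols with _|_|_|_|_|_|n
  · obtain ⟨c, hc⟩ := find_rank_some cols (by omega)
    rw [hm] at hc
    rw [hc]; simp
  · obtain ⟨c, hc⟩ := find_rank_some cols (by omega)
    rw [hm] at hc
    rw [find_rank_none cols 0 (by omega), hc]; simp
  · obtain ⟨c, hc⟩ := find_rank_some cols (by omega)
    rw [hm] at hc
    rw [find_rank_none cols 0 (by omega), find_rank_none cols 1 (by omega), hc]; simp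
  · obtain ⟨c, hc⟩ := find_rank_some cols (by omega)
    rw [hm] at hc
    rw [find_rank_none cols 0 (by omega), find_rank_none cols 1 (by omega),
        find_rank_none cols 2 (by omega), hc]; simp
  · obtain ⟨c, hc⟩ := find_rank_some cols (by omega)
    rw [hm] at hc
    rw [find_rank_none cols 0 (by omega), find_rank_none cols 1 (by omega),
        find_rank_none cols 2 (by omega), find_rank_none cols 3 (by omega), hc]; simp
  · obtain ⟨c, hc⟩ := find_rank_some cols (by omega)
    rw [hm] at hc
    rw [find_rank_none cols 0 (by omega), find_rank_none cols 1 (by omega),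
        find_rank_none cols 2 (by omega), find_rank_none cols 3 (by omega),
        find_rank_none cols 4 (by omega),
        find_isIn_eq cols (fun c hcm => by have := pvMrk_le_rank cols c hcm; omega), hc]
    simp
  · rw [find_rank_none cols 0 (by omega), find_rank_none cols 1 (by omega),
        find_rank_none cols 2 (by omega), find_rank_none cols 3 (by omega),
        find_rank_none cols 4 (by omega),
        find_isIn_eq cols (fun c hcm => by have := pvMrk_le_rank cols c hcm; omega),
        find_rank_none cols 5 (by omega), if_neg (by omega)]
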